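-- pv_equiv track=rewrite | github.com/KingaBunkowska/Zadania-WDI | Kolokwia/2021-2022-1a-2.py | na_czworkowy
-- ===== SOURCE A (Python) =====
-- def na_czworkowy(a):
--     result = 0
--     i = 0
--     while a>0:
--         result += (a%4) * (10**i)
--         i += 1
--         a //= 4
--
--     return result
-- ===== SOURCE B (Python) =====
-- def na_czworkowy(a):
--     if a <= 0:
--         return 0
--     return a % 4 + 10 * na_czworkowy(a // 4)
-- ===== Notes on version B (the rewrite author's own statement) =====
-- stated objective: simpler
-- what changed: Replaced the iterative accumulator with explicit power-of-10 bookkeeping (result, i) by a direct recursion a%4 + 10*na_czworkowy(a//4) with base case a<=0 -> 0.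
import Mathlib
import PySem

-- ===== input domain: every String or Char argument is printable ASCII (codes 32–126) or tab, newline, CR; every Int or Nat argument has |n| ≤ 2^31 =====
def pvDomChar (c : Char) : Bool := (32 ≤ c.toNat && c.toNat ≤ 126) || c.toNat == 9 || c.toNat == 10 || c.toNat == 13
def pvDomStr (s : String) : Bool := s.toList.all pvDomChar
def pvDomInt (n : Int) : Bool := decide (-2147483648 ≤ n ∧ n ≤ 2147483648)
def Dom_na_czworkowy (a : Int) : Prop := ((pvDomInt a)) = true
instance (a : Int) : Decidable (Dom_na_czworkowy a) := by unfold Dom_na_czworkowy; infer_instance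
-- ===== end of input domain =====

-- B replaces A's iterative (result, i) accumulator with a direct recursion; objective: simpler.

-- ===== PORT A =====
-- the while loop of A, state (result, i, a); terminates because a//4 < a when a > 0
def naLoop (a result i : Int) : Int :=
  if h : a > 0 then
    naLoop (PySem.Int.floordiv a 4) (result + PySem.Int.mod a 4 * 10 ^ i.toNat) (i + 1)
  else result
termination_by a.toNat
decreasing_by
  have h4 : PySem.Int.floordiv a 4 = a / 4 := PySem.Int.floordiv_eq_ediv_of_pos (by omega)
  rw [h4]; omega

def na_czworkowy (a : Int) : Int := naLoop a 0 0

-- ===== PORT B =====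
def na_czworkowy_alt (a : Int) : Int :=
  if h : a ≤ 0 then 0
  else PySem.Int.mod a 4 + 10 * na_czworkowy_alt (PySem.Int.floordiv a 4)
termination_by a.toNat
decreasing_by
  have h4 : PySem.Int.floordiv a 4 = a / 4 := PySem.Int.floordiv_eq_ediv_of_pos (by omega)
  rw [h4]; omega

-- ===== PRECONDITION & SPEC =====
def Spec_na_czworkowy (a : Int) (out : Int) : Prop := out = na_czworkowy_alt a
instance (a : Int) (out : Int) : Decidable (Spec_na_czworkowy a out) := by unfold Spec_na_czworkowy; infer_instance

-- ===== CLAIM (what is proved, stated in full; the proofs are below) =====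
def Claim_equal_na_czworkowy : Prop := ∀ (a : Int), Dom_na_czworkowy a → Spec_na_czworkowy a (na_czworkowy a)

-- ===== LEMMAS AND PROOFS =====

-- loop invariant: the loop adds 10^i times B's value of the remaining a
theorem naLoop_eq (n : Nat) (a result i : Int) (ha : a.toNat ≤ n) (hi : 0 ≤ i) :
    naLoop a result i = result + 10 ^ i.toNat * na_czworkowy_alt a := by
  induction n generalizing a result i with
  | zero =>
    have hle : a ≤ 0 := by omega
    rw [naLoop, na_czworkowy_alt]
    simp [hle, not_lt.mpr hle]
  | succ n ih =>
    by_cases h : a > 0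
    · have h4 : PySem.Int.floordiv a 4 = a / 4 := PySem.Int.floordiv_eq_ediv_of_pos (by omega)
      rw [naLoop, na_czworkowy_alt]
      simp only [h, dif_pos, not_le.mpr h, dif_neg, not_false_iff]
      rw [ih _ _ _ (by rw [h4]; omega) (by omega)]
      have hpow : (i + 1).toNat = i.toNat + 1 := by omega
      rw [hpow, pow_succ]
      ring
    · have hle : a ≤ 0 := by omega
      rw [naLoop, na_czworkowy_alt]
      simp [hle, not_lt.mpr hle]

-- ===== VERDICT (by name: the statement is the Claim_ definition above) =====
theorem na_czworkowy_spec : Claim_equal_na_czworkowy := by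
  intro a _
  unfold Spec_na_czworkowy na_czworkowy
  rw [naLoop_eq a.toNat a 0 0 le_rfl le_rfl]
  simp
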